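-- pv_equiv track=rewrite | github.com/samartomar/integration-hub | apps/api/src/schema/syntegris_adoption.py | summarize_syntegris_adoption
-- ===== SOURCE A (Python) =====
-- from typing import Any
--
-- LEGACY_ONLY = "LEGACY_ONLY"
--
-- CANON_DEFINED = "CANON_DEFINED"
--
-- MAPPING_IN_PROGRESS = "MAPPING_IN_PROGRESS"
--
-- CERTIFIED = "CERTIFIED"
--
-- RELEASE_READY = "RELEASE_READY"
--
-- SYNTEGRIS_READY = "SYNTEGRIS_READY"
--
-- BLOCKED = "BLOCKED"
--
-- def summarize_syntegris_adoption(items: list[dict[str, Any]]) -> dict[str, Any]: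
--     """Build summary counts by adoption status."""
--     counts: dict[str, int] = {
--         LEGACY_ONLY: 0,
--         CANON_DEFINED: 0,
--         MAPPING_IN_PROGRESS: 0,
--         CERTIFIED: 0,
--         RELEASE_READY: 0,
--         SYNTEGRIS_READY: 0,
--         BLOCKED: 0,
--     }
--     for item in items:
--         status = (item.get("adoptionStatus") or "").strip().upper()
--         if status in counts:
--             counts[status] += 1
--         else:
--             counts[BLOCKED] = counts.get(BLOCKED, 0) + 1
--     return {
--         "total": len(items),
--         "legacyOnly": counts[LEGACY_ONLY],
--         "canonDefined": counts[CANON_DEFINED],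
--         "mappingInProgress": counts[MAPPING_IN_PROGRESS],
--         "certified": counts[CERTIFIED],
--         "releaseReady": counts[RELEASE_READY],
--         "syntegrisReady": counts[SYNTEGRIS_READY],
--         "blocked": counts[BLOCKED],
--     }
-- ===== SOURCE B (Python) =====
-- def summarize_syntegris_adoption(items):
--     """Build summary counts by adoption status: normalize once, then count per status."""
--     statuses = [(item.get("adoptionStatus") or "").strip().upper() for item in items]
--     total = len(statuses)
--     legacy = statuses.count("LEGACY_ONLY")
--     canon = statuses.count("CANON_DEFINED")
--     mapping = statuses.count("MAPPING_IN_PROGRESS")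
--     certified = statuses.count("CERTIFIED")
--     release = statuses.count("RELEASE_READY")
--     ready = statuses.count("SYNTEGRIS_READY")
--     return {
--         "total": total,
--         "legacyOnly": legacy,
--         "canonDefined": canon,
--         "mappingInProgress": mapping,
--         "certified": certified,
--         "releaseReady": release,
--         "syntegrisReady": ready,
--         "blocked": total - (legacy + canon + mapping + certified + release + ready),
--     }
-- ===== Notes on version B (the rewrite author's own statement) =====
-- stated objective: alternative
-- what changed: B uses no counting dict at all: it normalizes the statuses into a list in one pass, then makes six separate list.count passes (one per known status) and derives blocked as total minus their sum, instead of A's single loop maintaining a pre-seeded seven-key dict with a membership-test branch routing unknown statuses to BLOCKED.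
import Mathlib
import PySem

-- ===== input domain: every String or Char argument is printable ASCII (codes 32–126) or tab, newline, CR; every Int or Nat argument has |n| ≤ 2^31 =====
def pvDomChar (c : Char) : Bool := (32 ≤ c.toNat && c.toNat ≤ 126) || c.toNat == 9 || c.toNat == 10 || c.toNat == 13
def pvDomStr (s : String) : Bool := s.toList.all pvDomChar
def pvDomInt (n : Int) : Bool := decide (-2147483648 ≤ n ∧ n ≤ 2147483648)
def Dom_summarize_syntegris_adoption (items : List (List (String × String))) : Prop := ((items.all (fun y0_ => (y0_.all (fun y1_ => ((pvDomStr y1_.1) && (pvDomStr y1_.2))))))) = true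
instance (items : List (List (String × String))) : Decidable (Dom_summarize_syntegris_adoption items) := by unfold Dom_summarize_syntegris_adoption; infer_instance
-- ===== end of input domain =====

-- B drops A's counting dict entirely: it normalizes the statuses into a list, counts each of the six
-- known statuses by a separate list.count pass, and derives "blocked" by complement subtraction
-- (objective: alternative decomposition, same asymptotic cost).

-- ===== PORT A =====
def summarize_syntegris_adoption (items : List (List (String × String))) : List (String × Int) :=
  let counts0 : PySem.Dict String Int := PySem.Dict.ofList
    [("LEGACY_ONLY", 0), ("CANON_DEFINED", 0), ("MAPPING_IN_PROGRESS", 0), ("CERTIFIED", 0),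
     ("RELEASE_READY", 0), ("SYNTEGRIS_READY", 0), ("BLOCKED", 0)]
  let counts := items.foldl (fun counts item =>
    -- (item.get("adoptionStatus") or "").strip().upper(); get-with-default "" is exact since "" or "" == ""
    let status := PySem.Str.upper (PySem.Str.strip ((PySem.Dict.mk item).getD "adoptionStatus" ""))
    if counts.contains status then
      counts.insert status (counts.getD status 0 + 1)   -- counts[status] += 1 (key present by the guard)
    else
      counts.insert "BLOCKED" (counts.getD "BLOCKED" 0 + 1)) counts0
  [("total", (items.length : Int)),
   ("legacyOnly", counts.getD "LEGACY_ONLY" 0),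
   ("canonDefined", counts.getD "CANON_DEFINED" 0),
   ("mappingInProgress", counts.getD "MAPPING_IN_PROGRESS" 0),
   ("certified", counts.getD "CERTIFIED" 0),
   ("releaseReady", counts.getD "RELEASE_READY" 0),
   ("syntegrisReady", counts.getD "SYNTEGRIS_READY" 0),
   ("blocked", counts.getD "BLOCKED" 0)]

-- ===== PORT B =====
def summarize_syntegris_adoption_alt (items : List (List (String × String))) : List (String × Int) :=
  let statuses := items.map (fun item =>
    PySem.Str.upper (PySem.Str.strip ((PySem.Dict.mk item).getD "adoptionStatus" "")))
  let total : Int := statuses.length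
  let legacy : Int := PySem.List.count statuses "LEGACY_ONLY"
  let canon : Int := PySem.List.count statuses "CANON_DEFINED"
  let mapping : Int := PySem.List.count statuses "MAPPING_IN_PROGRESS"
  let certified : Int := PySem.List.count statuses "CERTIFIED"
  let release : Int := PySem.List.count statuses "RELEASE_READY"
  let ready : Int := PySem.List.count statuses "SYNTEGRIS_READY"
  [("total", total),
   ("legacyOnly", legacy),
   ("canonDefined", canon),
   ("mappingInProgress", mapping),
   ("certified", certified),
   ("releaseReady", release),
   ("syntegrisReady", ready),
   ("blocked", total - (legacy + canon + mapping + certified + release + ready))]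

-- ===== PRECONDITION & SPEC =====
def Spec_summarize_syntegris_adoption (items : List (List (String × String))) (out : List (String × Int)) : Prop := out = summarize_syntegris_adoption_alt items
instance (items : List (List (String × String))) (out : List (String × Int)) : Decidable (Spec_summarize_syntegris_adoption items out) := by unfold Spec_summarize_syntegris_adoption; infer_instance

-- ===== CLAIM =====
def Claim_equal_summarize_syntegris_adoption : Prop := ∀ (items : List (List (String × String))), Dom_summarize_syntegris_adoption items → Spec_summarize_syntegris_adoption items (summarize_syntegris_adoption items)

-- ===== LEMMAS AND PROOFS =====

-- normalized status of one item (both ports compute this same value)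
def pvNorm (item : List (String × String)) : String :=
  PySem.Str.upper (PySem.Str.strip ((PySem.Dict.mk item).getD "adoptionStatus" ""))

-- Bool membership tests for the six non-blocked statuses and all seven keys
def sixChk (s : String) : Bool :=
  s == "LEGACY_ONLY" || s == "CANON_DEFINED" || s == "MAPPING_IN_PROGRESS" ||
  s == "CERTIFIED" || s == "RELEASE_READY" || s == "SYNTEGRIS_READY"
def sevenChk (s : String) : Bool := sixChk s || s == "BLOCKED"

-- where A's loop body sends a status
def redir (s : String) : String := if sevenChk s then s else "BLOCKED"
theorem sevenChk_redir (s : String) : sevenChk (redir s) = true := by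
  unfold redir; by_cases h : sevenChk s = true
  · simp [h]
  · simp [h]; decide

theorem pw1 (s k : String) (hk : sixChk k = true) : ((redir s) == k) = (s == k) := by
  unfold redir
  by_cases h : sevenChk s = true
  · simp [h]
  · have h7 : sevenChk s = false := by simpa using h
    simp only [sixChk, Bool.or_eq_true, beq_iff_eq] at hk
    have hb : ("BLOCKED" == k) = false := by
      rcases hk with ((((h1|h1)|h1)|h1)|h1)|h1 <;> subst h1 <;> decide
    have hsk : (s == k) = false := by
      by_cases hs : s = k
      · exfalso; subst hs
        rcases hk with ((((h1|h1)|h1)|h1)|h1)|h1 <;> subst h1 <;> exact absurd h7 (by decide)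
      · simp [hs]
    simp [h7, hb, hsk]

theorem pw2 (s : String) : ((redir s) == "BLOCKED") = !sixChk s := by
  unfold redir
  by_cases h6 : sixChk s = true
  · have h7 : sevenChk s = true := by simp [sevenChk, h6]
    have hsb : (s == "BLOCKED") = false := by
      simp only [sixChk, Bool.or_eq_true, beq_iff_eq] at h6
      rcases h6 with ((((h1|h1)|h1)|h1)|h1)|h1 <;> subst h1 <;> decide
    simp [h7, hsb, h6]
  · by_cases hb : s = "BLOCKED"
    · subst hb; simp [sevenChk, sixChk] at h6 ⊢
    · have h7 : sevenChk s = false := by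
        have h6' : sixChk s = false := by simpa using h6
        simp [sevenChk, h6', hb]
      simp [h7, h6]

theorem contains_step (d : PySem.Dict String Int) (s : String) (v : Int)
    (hd : ∀ k, d.contains k = sevenChk k) (hs : sevenChk s = true) :
    ∀ k, (d.insert s v).contains k = sevenChk k := by
  intro k
  rw [PySem.Dict.contains_insert, hd]
  by_cases hk : k = s
  · subst hk; simp [hs]
  · simp [hk]

theorem foldA (items : List (List (String × String))) :
    ∀ d : PySem.Dict String Int, (∀ k, d.contains k = sevenChk k) →
    items.foldl (fun counts item =>
        let status := PySem.Str.upper (PySem.Str.strip ((PySem.Dict.mk item).getD "adoptionStatus" ""))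
        if counts.contains status then counts.insert status (counts.getD status 0 + 1)
        else counts.insert "BLOCKED" (counts.getD "BLOCKED" 0 + 1)) d
    = ((items.map pvNorm).map redir).foldl (fun c s => c.insert s (c.getD s 0 + 1)) d := by
  induction items with
  | nil => intro d _; rfl
  | cons item items ih =>
    intro d hd
    simp only [List.foldl_cons, List.map_cons]
    have hstep : (if d.contains (pvNorm item) then d.insert (pvNorm item) (d.getD (pvNorm item) 0 + 1)
                  else d.insert "BLOCKED" (d.getD "BLOCKED" 0 + 1))
                 = d.insert (redir (pvNorm item)) (d.getD (redir (pvNorm item)) 0 + 1) := by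
      rw [hd (pvNorm item)]; unfold redir; by_cases h : sevenChk (pvNorm item) = true <;> simp [h]
    show List.foldl _ (if d.contains (pvNorm item) then d.insert (pvNorm item) (d.getD (pvNorm item) 0 + 1)
                  else d.insert "BLOCKED" (d.getD "BLOCKED" 0 + 1)) items = _
    rw [hstep]
    exact ih _ (contains_step d (redir (pvNorm item)) _ hd (sevenChk_redir (pvNorm item)))

theorem partition_count (ss : List String) :
    ss.count "LEGACY_ONLY" + ss.count "CANON_DEFINED" + ss.count "MAPPING_IN_PROGRESS" +
    ss.count "CERTIFIED" + ss.count "RELEASE_READY" + ss.count "SYNTEGRIS_READY" +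
    ss.countP (fun s => !sixChk s) = ss.length := by
  induction ss with
  | nil => rfl
  | cons s ss ih =>
    simp only [List.count_cons, List.countP_cons, List.length_cons]
    by_cases h6 : sixChk s = true
    · simp only [h6, Bool.not_true]
      simp only [sixChk, Bool.or_eq_true, beq_iff_eq] at h6
      rcases h6 with ((((h1|h1)|h1)|h1)|h1)|h1 <;> subst h1 <;> simp <;> omega
    · have h6' : sixChk s = false := by simpa using h6
      simp only [sixChk, Bool.or_eq_true, beq_iff_eq, not_or] at h6
      obtain ⟨⟨⟨⟨⟨n1, n2⟩, n3⟩, n4⟩, n5⟩, n6⟩ := h6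
      simp [n1, n2, n3, n4, n5, n6, h6']
      omega

theorem count_map_redir (ss : List String) (k : String) (hk : sixChk k = true) :
    (ss.map redir).count k = ss.count k := by
  rw [List.count_eq_countP, List.countP_map, List.count_eq_countP]
  apply List.countP_congr
  intro s _
  simp only [Function.comp_apply]; rw [pw1 s k hk]

theorem count_map_redir_blocked (ss : List String) :
    (ss.map redir).count "BLOCKED" = ss.countP (fun s => !sixChk s) := by
  rw [List.count_eq_countP, List.countP_map]
  apply List.countP_congr
  intro s _
  simp only [Function.comp_apply]; rw [pw2 s]

theorem counts0_getD (k : String) :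
    (PySem.Dict.ofList
      [("LEGACY_ONLY", (0:Int)), ("CANON_DEFINED", 0), ("MAPPING_IN_PROGRESS", 0), ("CERTIFIED", 0),
       ("RELEASE_READY", 0), ("SYNTEGRIS_READY", 0), ("BLOCKED", 0)]).getD k 0 = 0 := by
  have h : (PySem.Dict.ofList
      [("LEGACY_ONLY", (0:Int)), ("CANON_DEFINED", 0), ("MAPPING_IN_PROGRESS", 0), ("CERTIFIED", 0),
       ("RELEASE_READY", 0), ("SYNTEGRIS_READY", 0), ("BLOCKED", 0)])
      = PySem.Dict.mk [("LEGACY_ONLY", (0:Int)), ("CANON_DEFINED", 0), ("MAPPING_IN_PROGRESS", 0),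
        ("CERTIFIED", 0), ("RELEASE_READY", 0), ("SYNTEGRIS_READY", 0), ("BLOCKED", 0)] := rfl
  rw [h]
  simp only [PySem.Dict.getD_eq_get?_getD, PySem.Dict.get?_mk_cons]
  split_ifs <;> rfl

theorem counts0_contains (k : String) :
    (PySem.Dict.ofList
      [("LEGACY_ONLY", (0:Int)), ("CANON_DEFINED", 0), ("MAPPING_IN_PROGRESS", 0), ("CERTIFIED", 0),
       ("RELEASE_READY", 0), ("SYNTEGRIS_READY", 0), ("BLOCKED", 0)]).contains k = sevenChk k := by
  simp only [PySem.Dict.ofList, PySem.Dict.update, PySem.Dict.contains, PySem.Dict.insert,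
    PySem.Dict.empty, sevenChk, sixChk]
  simp [BEq.comm, Bool.or_assoc]

theorem summarize_syntegris_adoption_spec : Claim_equal_summarize_syntegris_adoption := by
  intro items _
  show summarize_syntegris_adoption items = summarize_syntegris_adoption_alt items
  simp only [summarize_syntegris_adoption, summarize_syntegris_adoption_alt]
  have hmap : (items.map (fun item =>
      PySem.Str.upper (PySem.Str.strip ((PySem.Dict.mk item).getD "adoptionStatus" "")))) = items.map pvNorm := rfl
  rw [hmap, foldA items _ counts0_contains]
  simp only [PySem.Dict.getD_foldl_insert_add_one, counts0_getD, PySem.List.count_eq,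
    List.length_map, zero_add]
  rw [count_map_redir_blocked,
      count_map_redir _ "LEGACY_ONLY" (by decide), count_map_redir _ "CANON_DEFINED" (by decide),
      count_map_redir _ "MAPPING_IN_PROGRESS" (by decide), count_map_redir _ "CERTIFIED" (by decide),
      count_map_redir _ "RELEASE_READY" (by decide), count_map_redir _ "SYNTEGRIS_READY" (by decide)]
  have hp := partition_count (items.map pvNorm)
  simp only [List.length_map] at hp
  simp only [List.cons.injEq, Prod.mk.injEq, and_true, true_and]
  omega
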